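-- pv_equiv track=rewrite | github.com/Ajiteshrock/Assignment_StarXLabs | First_Question.py | get_checkout_time
-- ===== SOURCE A (Python) =====
-- def get_checkout_time(l:list, num_reg:int):
--     queue = [None] * num_reg
--     if num_reg==1:
--         return sum(l)
--     else:
--         min_time = 0
--         count_= 0
--         for i in range(num_reg):
--             queue[i] = l[i]
--             count_= i
--         for j in range(count_+1,len(l)):
--                 min_ = min(queue)
--                 min_time+=min_
--                 for i in range(len(queue)):
--                     queue[i] = queue[i] - min_
--
--                 min_ = min(queue)
--                 ind = queue.index(min_)
--                 queue[ind] = l[j]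
--         min_time = min_time + max(queue)
--
--         return min_time
-- ===== SOURCE B (Python) =====
-- from bisect import insort_left
--
-- def get_checkout_time(l: list, num_reg: int):
--     if num_reg == 1:
--         return sum(l)
--     # sorted list of absolute finishing times, one per register
--     finish = sorted(l[:num_reg])
--     for x in l[num_reg:]:
--         m = finish.pop(0)          # earliest-finishing register takes the next customer
--         insort_left(finish, m + x)
--     return finish[-1]
-- ===== Notes on version B (the rewrite author's own statement) =====
-- stated objective: faster
-- what changed: A simulates relative remaining times, doing three full O(num_reg) Python-level scans per customer (min, subtract-min from every slot, index of the new min); B keeps one sorted list of absolute finishing times, popping the head and re-inserting head+service with a binary-search insertion (bisect.insort_left), and returns its last element.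
import Mathlib
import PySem

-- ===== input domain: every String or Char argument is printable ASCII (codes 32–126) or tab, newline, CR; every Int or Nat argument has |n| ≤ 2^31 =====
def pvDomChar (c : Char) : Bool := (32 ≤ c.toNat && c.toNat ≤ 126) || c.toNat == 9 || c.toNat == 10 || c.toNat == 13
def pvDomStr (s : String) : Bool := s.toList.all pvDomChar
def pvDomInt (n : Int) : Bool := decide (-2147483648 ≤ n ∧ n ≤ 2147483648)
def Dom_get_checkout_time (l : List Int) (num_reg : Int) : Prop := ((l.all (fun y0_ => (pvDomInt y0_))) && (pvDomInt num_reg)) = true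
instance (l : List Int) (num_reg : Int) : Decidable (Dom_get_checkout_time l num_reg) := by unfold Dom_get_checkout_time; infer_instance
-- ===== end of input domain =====

-- B replaces A's relative-time simulation (rescan queue for min, subtract min from every slot,
-- rescan for the index to replace) by a sorted list of absolute finishing times: pop the head,
-- re-insert head+service with one binary-search insertion (objective: faster; measured by the
-- timing run).

-- ===== PORT A =====
-- first loop: `queue[i] = l[i]; count_ = i`.  `[None]*num_reg` is modeled with 0 placeholders and
-- `l[i]` with default 0: on every input in Pre_ each placeholder slot is overwritten by a real l[i]
-- before any use, so the defaults are never observed (outside Pre_ the Python raises).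
def gctInit (l : List Int) (num_reg : Int) : List Int × Int :=
  (PySem.List.pyRange 0 num_reg 1).foldl
    (fun qc i => (qc.1.set i.toNat (PySem.List.pyGetD l i 0), i))
    (List.replicate num_reg.toNat 0, 0)

-- body of the second loop, on the value `l[j]` (min(queue) raises on an empty queue — Pre_ excludes;
-- `.getD 0` is never observed inside Pre_)
def gctStepE (st : List Int × Int) (x : Int) : List Int × Int :=
  let m := (PySem.List.min? st.1 (fun y => y)).getD 0          -- min_ = min(queue)
  let min_time := st.2 + m                                      -- min_time += min_
  let queue := st.1.map (fun q => q - m)                        -- for i …: queue[i] = queue[i] - min_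
  let m2 := (PySem.List.min? queue (fun y => y)).getD 0         -- min_ = min(queue)
  let ind := (PySem.List.index? queue m2).getD 0                -- ind = queue.index(min_)
  (queue.set ind x, min_time)                                   -- queue[ind] = l[j]

def gctStep (l : List Int) (st : List Int × Int) (j : Int) : List Int × Int :=
  gctStepE st (PySem.List.pyGetD l j 0)

def get_checkout_time (l : List Int) (num_reg : Int) : Int :=
  if num_reg = 1 then l.sum
  else
    let init := gctInit l num_reg
    let st := (PySem.List.pyRange (init.2 + 1) (l.length : Int) 1).foldl (gctStep l) (init.1, 0)
    st.2 + (PySem.List.max? st.1 (fun y => y)).getD 0           -- min_time + max(queue)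

-- ===== PORT B =====
-- bisect.insort_left: insert x at position bisect_left
def insortLeft (ys : List Int) (x : Int) : List Int :=
  let i := PySem.List.bisectLeft ys x
  ys.take i ++ x :: ys.drop i

-- finish.pop(0) then insort_left(finish, m + x); pop(0) on [] raises IndexError — Pre_ excludes,
-- the [] branch value is never observed inside Pre_
def gctAltStep (f : List Int) (x : Int) : List Int :=
  match f with
  | [] => []
  | m :: rest => insortLeft rest (m + x)

def get_checkout_time_alt (l : List Int) (num_reg : Int) : Int :=
  if num_reg = 1 then l.sum
  else
    let finish0 := PySem.List.sorted (PySem.List.slice l none (some num_reg)) (fun y => y)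
    let finish := (PySem.List.slice l (some num_reg) none).foldl gctAltStep finish0
    (PySem.List.pyGet? finish (-1)).getD 0                      -- finish[-1] ([] raises — Pre_ excludes)

-- ===== PRECONDITION & SPEC =====
-- exactly the inputs where the Python A returns: num_reg == 1 always returns sum(l); otherwise A
-- needs num_reg ≥ 2 registers all fillable from l (num_reg ≤ len(l)); num_reg ≤ 0 raises
-- (min/max of empty queue), and 2 ≤ num_reg > len(l) raises IndexError on l[i].
def Pre_get_checkout_time (l : List Int) (num_reg : Int) : Prop :=
  num_reg = 1 ∨ (2 ≤ num_reg ∧ num_reg ≤ (l.length : Int))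
instance (l : List Int) (num_reg : Int) : Decidable (Pre_get_checkout_time l num_reg) := by
  unfold Pre_get_checkout_time; infer_instance

def pvWitness_get_checkout_time : List Int × Int := ([3, 1, 2], 2)

def Spec_get_checkout_time (l : List Int) (num_reg : Int) (out : Int) : Prop := out = get_checkout_time_alt l num_reg
instance (l : List Int) (num_reg : Int) (out : Int) : Decidable (Spec_get_checkout_time l num_reg out) := by unfold Spec_get_checkout_time; infer_instance

-- ===== CLAIM (what is proved, stated in full; the proofs are below) =====
def Claim_equal_get_checkout_time : Prop := ∀ (l : List Int) (num_reg : Int), Dom_get_checkout_time l num_reg → Pre_get_checkout_time l num_reg → Spec_get_checkout_time l num_reg (get_checkout_time l num_reg)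

-- ===== LEMMAS AND PROOFS =====

theorem gctInit_fold (l : List Int) (n : Nat) (h2 : n ≤ l.length) :
    ∀ (q : List Int) (c : Int), n ≤ q.length →
    (PySem.List.pyRange 0 (n : Int) 1).foldl
        (fun qc i => (qc.1.set i.toNat (PySem.List.pyGetD l i 0), i)) (q, c)
      = (l.take n ++ q.drop n, if n = 0 then c else (n : Int) - 1) := by
  induction n with
  | zero => intro q c _; simp [PySem.List.pyRange_one_eq_nil]
  | succ n ih =>
    intro q c hq
    have hn : n ≤ l.length := by omega
    have hr : PySem.List.pyRange 0 ((n : Int) + 1) 1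
        = PySem.List.pyRange 0 (n : Int) 1 ++ [(n : Int)] := by
      exact PySem.List.pyRange_one_succ_right (by positivity)
    have hcast : ((n + 1 : Nat) : Int) = (n : Int) + 1 := by push_cast; ring
    rw [hcast, hr, List.foldl_append, ih hn q c (by omega)]
    have hql : n < q.length := by omega
    have hll : n < l.length := by omega
    have htl : (l.take n).length = n := by simp [List.length_take]; omega
    simp only [List.foldl_cons, List.foldl_nil, Int.toNat_natCast]
    have hset : (l.take n ++ q.drop n).set n (PySem.List.pyGetD l (n : Int) 0)
        = l.take (n + 1) ++ q.drop (n + 1) := by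
      rw [List.drop_eq_getElem_cons hql, List.set_append_right _ _ (by omega),
        htl, Nat.sub_self, List.set_cons_zero]
      rw [PySem.List.pyGetD_natCast, List.getD_eq_getElem l 0 hll]
      rw [show l.take (n + 1) = l.take n ++ [l[n]] from by
        rw [List.take_add_one, List.getElem?_eq_getElem hll]; rfl]
      simp only [List.append_assoc, List.singleton_append]
    rw [hset]
    simp

theorem gctInit_spec (l : List Int) (n : Nat) (h1 : 1 ≤ n) (h2 : n ≤ l.length) :
    gctInit l (n : Int) = (l.take n, (n : Int) - 1) := by
  unfold gctInit
  rw [Int.toNat_natCast]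
  rw [gctInit_fold l n h2 (List.replicate n 0) 0 (by simp)]
  simp [List.drop_replicate]
  omega

theorem insortLeft_perm (ys : List Int) (x : Int) : (insortLeft ys x).Perm (x :: ys) := by
  unfold insortLeft
  refine List.Perm.trans List.perm_middle ?_
  rw [List.take_append_drop]

theorem insortLeft_sorted (ys : List Int) (x : Int) (h : ys.Pairwise (· ≤ ·)) :
    (insortLeft ys x).Pairwise (· ≤ ·) := by
  obtain ⟨hle, hlt, hge⟩ := PySem.List.bisectLeft_spec ys x h
  unfold insortLeft
  rw [List.pairwise_append]
  have hdrop : ∀ b ∈ ys.drop (PySem.List.bisectLeft ys x), x ≤ b := by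
    intro b hb
    obtain ⟨j, hj, rfl⟩ := List.mem_iff_getElem.mp hb
    rw [List.getElem_drop]
    exact hge _ _ (Nat.le_add_right _ _)
  have htake : ∀ a ∈ ys.take (PySem.List.bisectLeft ys x), a < x := by
    intro a ha
    obtain ⟨j, hj, rfl⟩ := List.mem_iff_getElem.mp ha
    rw [List.getElem_take]
    exact hlt _ _ (by simpa using hj.trans_le (by simp))
  refine ⟨h.sublist (List.take_sublist _ _), ?_, ?_⟩
  · rw [List.pairwise_cons]
    exact ⟨hdrop, h.sublist (List.drop_sublist _ _)⟩
  · intro a ha b hb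
    rcases List.mem_cons.mp hb with rfl | hb
    · exact le_of_lt (htake a ha)
    · exact le_trans (le_of_lt (htake a ha)) (hdrop b hb)

-- xs[-1] on a nonempty list is its last element
theorem pyGet?_neg_one (xs : List Int) (h : xs ≠ []) :
    (PySem.List.pyGet? xs (-1)).getD 0 = xs.getLast h := by
  have hl : 1 ≤ xs.length := List.length_pos_iff.mpr h
  simp [PySem.List.pyGet?, PySem.List.pyIdx?, if_pos hl,
    ← List.getLast?_eq_getElem?, List.getLast?_eq_some_getLast h]

theorem le_getLast_of_sorted (l : List Int) (h : l.Pairwise (· ≤ ·)) (a : Int) (ha : a ∈ l)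
    (hne : l ≠ []) : a ≤ l.getLast hne := by
  obtain ⟨i, hi, rfl⟩ := List.mem_iff_getElem.mp ha
  rw [List.getLast_eq_getElem]
  rcases Nat.lt_or_ge i (l.length - 1) with hlt | hge
  · exact List.pairwise_iff_getElem.mp h i (l.length - 1) hi (by omega) hlt
  · have hieq : i = l.length - 1 := by omega
    subst hieq; exact le_refl _

-- one simulation step preserves: finish is sorted and is a permutation of queue shifted by min_time
theorem step_inv (queue finish : List Int) (t x : Int)
    (hne : queue ≠ []) (hs : finish.Pairwise (· ≤ ·)) (hp : finish.Perm (queue.map (· + t))) :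
    (gctAltStep finish x).Pairwise (· ≤ ·) ∧
    (gctAltStep finish x).Perm ((gctStepE (queue, t) x).1.map (· + (gctStepE (queue, t) x).2)) ∧
    (gctStepE (queue, t) x).1 ≠ [] := by
  obtain ⟨m, hm⟩ : ∃ m, PySem.List.min? queue (fun y => y) = some m := by
    cases hmn : PySem.List.min? queue (fun y => y) with
    | none => exact absurd ((PySem.List.min?_eq_none_iff queue (fun y => y)).mp hmn) hne
    | some m => exact ⟨m, rfl⟩
  have hmmem : m ∈ queue := PySem.List.min?_mem hm
  have hmmin : ∀ y ∈ queue, m ≤ y := fun y hy => by simpa using PySem.List.min?_isMin hm y hy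
  have hQ1ne : queue.map (· - m) ≠ [] := by simpa using hne
  have h0mem : (0:Int) ∈ queue.map (· - m) := List.mem_map.mpr ⟨m, hmmem, by ring⟩
  have h0min : ∀ y ∈ queue.map (· - m), (0:Int) ≤ y := by
    intro y hy; obtain ⟨q, hq, rfl⟩ := List.mem_map.mp hy
    have := hmmin q hq; omega
  have hm2 : PySem.List.min? (queue.map (· - m)) (fun y => y) = some 0 := by
    cases hmn : PySem.List.min? (queue.map (· - m)) (fun y => y) with
    | none => exact absurd ((PySem.List.min?_eq_none_iff _ _).mp hmn) hQ1ne
    | some z =>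
      have hzmem := PySem.List.min?_mem hmn
      have hzmin : z ≤ 0 := by simpa using PySem.List.min?_isMin hmn 0 h0mem
      have hz0 : (0:Int) ≤ z := h0min z hzmem
      rw [le_antisymm hzmin hz0]
  obtain ⟨k, hk⟩ : ∃ k, PySem.List.index? (queue.map (· - m)) 0 = some k := by
    cases hidx : PySem.List.index? (queue.map (· - m)) 0 with
    | none => exact absurd ((PySem.List.index?_eq_none_iff _ _).mp hidx) (by simp; simpa using h0mem)
    | some k => exact ⟨k, rfl⟩
  obtain ⟨pre, suf, hQsplit, hklen, h0pre⟩ := (PySem.List.index?_eq_some_iff _ _ _).mp hk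
  have hstep : gctStepE (queue, t) x = (pre ++ x :: suf, t + m) := by
    simp only [gctStepE, hm, hm2, hk, Option.getD_some]
    rw [hQsplit, List.set_append_right _ _ (by omega), ← hklen, Nat.sub_self,
      List.set_cons_zero]
  obtain ⟨f0, rest, rfl⟩ : ∃ f0 rest, finish = f0 :: rest := by
    cases hf : finish with
    | nil =>
      rw [hf] at hp
      have := hp.length_eq
      simp at this
      exact absurd (List.length_eq_zero_iff.mp this.symm) hne
    | cons f0 rest => exact ⟨f0, rest, rfl⟩
  have hf0mem : f0 ∈ queue.map (· + t) := hp.subset List.mem_cons_self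
  have hf0ge : m + t ≤ f0 := by
    obtain ⟨y, hy, heq⟩ := List.mem_map.mp hf0mem
    have := hmmin y hy; omega
  have hmtmem : m + t ∈ f0 :: rest := hp.symm.subset (List.mem_map_of_mem hmmem)
  have hf0le : f0 ≤ m + t := by
    rcases List.mem_cons.mp hmtmem with heq | hmem
    · omega
    · exact List.rel_of_pairwise_cons hs hmem
  have hf0 : f0 = m + t := le_antisymm hf0le hf0ge
  have hrest : rest.Perm ((queue.map (· + t)).erase (m + t)) := by
    have h1 : (queue.map (· + t)).Perm
        ((m + t) :: (queue.map (· + t)).erase (m + t)) :=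
      List.perm_cons_erase (List.mem_map_of_mem hmmem)
    have h2 := hp.trans h1
    rw [hf0] at h2
    exact h2.cons_inv
  have hLg : queue.map (· + t) = (queue.map (· - m)).map (· + (t + m)) := by
    rw [List.map_map]
    apply List.map_congr_left
    intro q _; show q + t = q - m + (t + m); ring
  have hgpre : (m + t) ∉ pre.map (· + (t + m)) := by
    intro hmem
    obtain ⟨p, hp', heq⟩ := List.mem_map.mp hmem
    have hp0 : p = 0 := by omega
    exact h0pre (hp0 ▸ hp')
  have herase : (queue.map (· + t)).erase (m + t)
      = pre.map (· + (t + m)) ++ suf.map (· + (t + m)) := by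
    rw [hLg, hQsplit, List.map_append, List.map_cons]
    rw [List.erase_append_right _ hgpre]
    have hg0 : (0:Int) + (t + m) = m + t := by ring
    rw [hg0, List.erase_cons_head]
  rw [hstep]
  simp only [gctAltStep]
  refine ⟨insortLeft_sorted _ _ hs.of_cons, ?_, by simp⟩
  refine (insortLeft_perm _ _).trans ?_
  have hmap : ((pre ++ x :: suf).map (· + (t + m)))
      = pre.map (· + (t + m)) ++ (x + (t + m)) :: suf.map (· + (t + m)) := by
    simp
  rw [hmap]
  refine List.Perm.trans ?_ List.perm_middle.symm
  have hx : f0 + x = x + (t + m) := by omega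
  rw [hx, ← herase]
  exact hrest.cons _

theorem loop_inv (xs : List Int) : ∀ (queue finish : List Int) (t : Int),
    queue ≠ [] → finish.Pairwise (· ≤ ·) → finish.Perm (queue.map (· + t)) →
    (xs.foldl gctAltStep finish).Pairwise (· ≤ ·) ∧
    (xs.foldl gctAltStep finish).Perm
      ((xs.foldl gctStepE (queue, t)).1.map (· + (xs.foldl gctStepE (queue, t)).2)) ∧
    (xs.foldl gctStepE (queue, t)).1 ≠ [] := by
  induction xs with
  | nil => intro q f t hne hs hp; exact ⟨hs, hp, hne⟩
  | cons x xs ih =>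
    intro q f t hne hs hp
    obtain ⟨hs', hp', hne'⟩ := step_inv q f t x hne hs hp
    simpa using ih (gctStepE (q, t) x).1 (gctAltStep f x) (gctStepE (q, t) x).2 hne' hs' hp'

-- last element of a sorted permutation of queue.map (·+t) is t + max(queue)
theorem final_eq (queue finish : List Int) (t : Int)
    (hne : queue ≠ []) (hs : finish.Pairwise (· ≤ ·)) (hp : finish.Perm (queue.map (· + t))) :
    t + (PySem.List.max? queue (fun y => y)).getD 0 = (PySem.List.pyGet? finish (-1)).getD 0 := by
  have hfne : finish ≠ [] := by
    intro hf
    have hlen := hp.length_eq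
    rw [hf] at hlen
    simp at hlen
    exact hne (List.length_eq_zero_iff.mp hlen.symm)
  obtain ⟨M, hM⟩ : ∃ M, PySem.List.max? queue (fun y => y) = some M := by
    cases hmx : PySem.List.max? queue (fun y => y) with
    | none => exact absurd ((PySem.List.max?_eq_none_iff queue (fun y => y)).mp hmx) hne
    | some M => exact ⟨M, rfl⟩
  have hMmem : M ∈ queue := PySem.List.max?_mem hM
  have hMmax : ∀ y ∈ queue, y ≤ M := by
    intro y hy; simpa using PySem.List.max?_isMax hM y hy
  rw [hM, pyGet?_neg_one finish hfne]
  have hlast_mem : finish.getLast hfne ∈ finish := List.getLast_mem hfne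
  have h1 : finish.getLast hfne ≤ t + M := by
    obtain ⟨y, hy, heq⟩ := List.mem_map.mp (hp.subset hlast_mem)
    have := hMmax y hy
    omega
  have h2 : t + M ≤ finish.getLast hfne := by
    have hmem : M + t ∈ finish := hp.symm.subset (List.mem_map_of_mem hMmem)
    have := le_getLast_of_sorted finish hs (M + t) hmem hfne
    omega
  simp only [Option.getD_some]
  omega

-- ===== VERDICT (by name: the statement is the Claim_ definition above) =====
theorem get_checkout_time_spec : Claim_equal_get_checkout_time := by
  intro l num_reg _hdom hpre
  unfold Spec_get_checkout_time
  rcases hpre with h1 | ⟨h2, hlen⟩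
  · simp [get_checkout_time, get_checkout_time_alt, h1]
  · have hne1 : num_reg ≠ 1 := by omega
    have h0 : (0:Int) ≤ num_reg := by omega
    have hnat : num_reg = ((num_reg.toNat : Int)) := by omega
    have h2n : 1 ≤ num_reg.toNat := by omega
    have hlenn : num_reg.toNat ≤ l.length := by omega
    rw [get_checkout_time, get_checkout_time_alt, if_neg hne1, if_neg hne1]
    have e1 : ((num_reg.toNat : Int)) - 1 + 1 = ((num_reg.toNat : Int)) := by ring
    have hgs : gctStep l = fun st j => gctStepE st (PySem.List.pyGetD l j 0) := rfl
    rw [hnat]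
    simp only [gctInit_spec l num_reg.toNat h2n hlenn, e1, hgs,
      PySem.List.slice_to_natCast, PySem.List.slice_from_natCast]
    rw [PySem.List.foldl_pyRange_pyGetD' l 0 gctStepE (l.take num_reg.toNat, 0)
      (by positivity)]
    simp only [Int.toNat_natCast]
    have hQne : l.take num_reg.toNat ≠ [] := by
      apply List.ne_nil_of_length_pos
      simp [List.length_take]; omega
    have hs0 : (PySem.List.sorted (l.take num_reg.toNat) (fun y => y)).Pairwise (· ≤ ·) := by
      simpa using PySem.List.sorted_pairwise (l.take num_reg.toNat) (fun y => y)
    have hp0 : (PySem.List.sorted (l.take num_reg.toNat) (fun y => y)).Perm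
        ((l.take num_reg.toNat).map (· + 0)) := by
      simpa using PySem.List.sorted_perm (l.take num_reg.toNat) (fun y => y) false
    obtain ⟨hs', hp', hne'⟩ :=
      loop_inv (l.drop num_reg.toNat) (l.take num_reg.toNat)
        (PySem.List.sorted (l.take num_reg.toNat) (fun y => y)) 0 hQne hs0 hp0
    exact final_eq _ _ _ hne' hs' hp'
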